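-- pv_equiv track=rewrite | github.com/pcn/advent_of_code_2015 | advent_day10.py | count_initial_repeats
-- ===== SOURCE A (Python) =====
-- def count_initial_repeats(s):
--     """Given a string of digits, take the first digit.
--     Iterate over the list, and count how many copies of the first digit (if any) were found following it.
--     Return a tuple of the number found, and how many times it was found.
--     """
--     this_number = s[0]
--     count = 1
--     for next_ch in s[1:]:
--         if next_ch != this_number:
--             break
--         count += 1
--     return (count, this_number,)
-- ===== SOURCE B (Python) =====
-- def count_initial_repeats(s):
--     """Given a string of digits, take the first digit.
--     Return (length of the leading run of that digit, the digit)."""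
--     this_number = s[0]
--     count = len(s) - len(s.lstrip(this_number))
--     return (count, this_number)
-- ===== Notes on version B (the rewrite author's own statement) =====
-- stated objective: simpler
-- what changed: Replaces the explicit scan-with-break loop by a loop-free computation: the leading-run length is len(s) minus the length of s with that character left-stripped.
import Mathlib
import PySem

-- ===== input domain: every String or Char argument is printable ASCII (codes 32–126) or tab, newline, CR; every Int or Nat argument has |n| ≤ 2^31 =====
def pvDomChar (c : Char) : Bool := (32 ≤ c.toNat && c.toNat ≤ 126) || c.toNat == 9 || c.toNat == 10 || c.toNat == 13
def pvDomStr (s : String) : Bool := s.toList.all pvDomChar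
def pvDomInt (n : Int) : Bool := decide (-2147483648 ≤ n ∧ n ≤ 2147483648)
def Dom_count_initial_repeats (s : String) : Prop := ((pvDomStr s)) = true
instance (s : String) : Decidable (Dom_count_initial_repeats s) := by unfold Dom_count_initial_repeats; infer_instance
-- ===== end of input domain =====

-- B computes the leading-run length without a loop, as len(s) - len(s.lstrip(s[0])): simpler.


-- ===== PORT A =====
-- the 'for next_ch in s[1:]: if next_ch != this_number: break; count += 1' loop
def crA_loop (this : Char) (count : Int) : List Char → Int
  | [] => count
  | c :: rest => if c ≠ this then count else crA_loop this (count + 1) rest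

def count_initial_repeats (s : String) : Int × String :=
  match PySem.Str.pyGet? s 0 with
  | none => (0, "")  -- unreachable: Python raises IndexError here (excluded by Pre_)
  | some this_number =>
      (crA_loop this_number 1 (PySem.Str.slice s (some 1) none).toList,
       String.ofList [this_number])

-- ===== PORT B =====
def count_initial_repeats_alt (s : String) : Int × String :=
  match PySem.Str.pyGet? s 0 with
  | none => (0, "")  -- unreachable: Python raises IndexError here (excluded by Pre_)
  | some this_number =>
      -- s.lstrip(this_number) with a single-character argument: drop the leading run of
      -- that character; ported by hand (exact: lstrip(chars) drops leading chars in the set).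
      let stripped := s.toList.dropWhile (fun c => c == this_number)
      ((s.toList.length : Int) - (stripped.length : Int), String.ofList [this_number])

-- ===== PRECONDITION & SPEC =====
-- Pre_ excludes only the empty string, on which Python A raises IndexError
def Pre_count_initial_repeats (s : String) : Prop := s ≠ ""
instance (s : String) : Decidable (Pre_count_initial_repeats s) := by unfold Pre_count_initial_repeats; infer_instance
def pvWitness_count_initial_repeats : String := "1112"

def Spec_count_initial_repeats (s : String) (out : Int × String) : Prop := out = count_initial_repeats_alt s
instance (s : String) (out : Int × String) : Decidable (Spec_count_initial_repeats s out) := by unfold Spec_count_initial_repeats; infer_instance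

-- ===== CLAIM (what is proved, stated in full; the proofs are below) =====
def Claim_equal_count_initial_repeats : Prop := ∀ (s : String), Dom_count_initial_repeats s → Pre_count_initial_repeats s → Spec_count_initial_repeats s (count_initial_repeats s)

-- ===== LEMMAS AND PROOFS =====
theorem crA_loop_eq (this : Char) (count : Int) (l : List Char) :
    crA_loop this count l = count + (l.takeWhile (fun c => c == this)).length := by
  induction l generalizing count with
  | nil => simp [crA_loop]
  | cons c rest ih =>
      by_cases h : c = this
      · simp [crA_loop, h, ih, List.takeWhile]
        omega
      · simp [crA_loop, h, beq_iff_eq]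

theorem count_initial_repeats_spec : Claim_equal_count_initial_repeats := by
  intro s _ hpre
  unfold Spec_count_initial_repeats count_initial_repeats count_initial_repeats_alt
  cases hl : s.toList with
  | nil =>
      exact absurd (by simpa using congrArg String.ofList hl) hpre
  | cons c0 rest =>
      have hget : PySem.Str.pyGet? s 0 = some c0 := by
        simp [PySem.Str.pyGet?_eq, PySem.Chars.pyGet?_eq_listPyGet?, hl,
          PySem.List.pyGet?, PySem.List.pyIdx?]
      have hslice : (PySem.Str.slice s (some 1) none).toList = rest := by
        have h1 := PySem.List.slice_from (xs := (c0 :: rest)) (a := 1)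
        simp [PySem.Str.toList_slice, hl, PySem.Chars.slice_eq_listSlice]
        simpa using h1
      simp only [hget, hslice]
      refine Prod.ext ?_ rfl
      simp only [crA_loop_eq, List.dropWhile_cons, List.length_cons]
      simp only [beq_self_eq_true, if_true]
      have hlen : (rest.takeWhile (fun c => c == c0)).length + (rest.dropWhile (fun c => c == c0)).length = rest.length := by
        rw [← List.length_append, List.takeWhile_append_dropWhile]
      push_cast
      omega
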